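-- pv_equiv track=rewrite | github.com/HN-lab/PyFluor | fluor_analysis.py | plate_axes
-- ===== SOURCE A (Python) =====
-- def plate_axes(tot_cols, tot_rows):
--     minor_axis = []
--     for i in range(1, tot_cols + 1):
--         minor_axis.append(i)
--     major_axis = []
--     alpha = 'A'
--     beta = ''
--     for i in range(1, tot_rows + 1):
--         if i == 27:
--             alpha = 'A'
--             beta = 'A'
--         elif i > 27:
--             if i % 26 == 1:
--                 alpha = 'A'
--                 beta = chr(ord(beta) + 1)
--         major_axis.append(beta + alpha)
--         alpha = chr(ord(alpha) + 1)
--     return minor_axis, major_axis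
-- ===== SOURCE B (Python) =====
-- def plate_axes(tot_cols, tot_rows):
--     minor_axis = list(range(1, tot_cols + 1))
--     major_axis = []
--     for i in range(1, tot_rows + 1):
--         if i <= 26:
--             major_axis.append(chr(64 + i))
--         else:
--             j = i - 27
--             major_axis.append(chr(65 + j // 26) + chr(65 + j % 26))
--     return minor_axis, major_axis
-- ===== Notes on version B (the rewrite author's own statement) =====
-- stated objective: simpler
-- what changed: Each row label is computed independently by a closed-form chr formula on the index (single letter for i<=26, two letters from (i-27) divmod 26 for larger i) instead of carrying alpha/beta character state across iterations with reset/elif branches; the column list is a direct range().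
import Mathlib
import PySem

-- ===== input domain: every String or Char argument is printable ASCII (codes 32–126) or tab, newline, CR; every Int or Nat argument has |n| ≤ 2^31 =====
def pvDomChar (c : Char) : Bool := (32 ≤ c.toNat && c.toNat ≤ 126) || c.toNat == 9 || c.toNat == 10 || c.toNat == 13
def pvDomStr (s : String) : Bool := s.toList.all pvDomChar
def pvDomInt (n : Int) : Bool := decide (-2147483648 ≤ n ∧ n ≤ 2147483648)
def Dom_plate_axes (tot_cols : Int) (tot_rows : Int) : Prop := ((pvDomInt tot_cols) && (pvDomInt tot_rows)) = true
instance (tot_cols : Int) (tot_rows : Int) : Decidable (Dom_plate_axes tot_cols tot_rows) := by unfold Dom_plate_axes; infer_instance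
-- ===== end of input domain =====

-- B computes each row label independently by a closed-form divmod formula instead of A's
-- alpha/beta character state carried across iterations (objective: simpler).

-- ===== PORT A =====
-- alpha and beta are carried as Unicode code points (Nat); beta = 0 encodes Python's ''.
-- chr(x) is ported as Char.ofNat; this is exact while codes stay below 0x110000, which
-- holds whenever both Pythons return (past that limit chr raises ValueError in A and B alike).
def plateStepA (st : List String × Nat × Nat) (i : Int) : List String × Nat × Nat :=
  let ab : Nat × Nat :=
    if i = 27 then (65, 65)
    else if i > 27 then
      if PySem.Int.mod i 26 = 1 then (65, st.2.2 + 1) else (st.2.1, st.2.2)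
    else (st.2.1, st.2.2)
  (st.1 ++ [(if ab.2 = 0 then "" else String.ofList [Char.ofNat ab.2]) ++ String.ofList [Char.ofNat ab.1]],
   ab.1 + 1, ab.2)

def plate_axes (tot_cols : Int) (tot_rows : Int) : List Int × List String :=
  let minor := (PySem.List.pyRange 1 (tot_cols + 1) 1).foldl (fun acc i => acc ++ [i]) []
  let res := (PySem.List.pyRange 1 (tot_rows + 1) 1).foldl plateStepA ([], 65, 0)
  (minor, res.1)

-- ===== PORT B =====
def rowLabelB (i : Int) : String :=
  if i ≤ 26 then String.ofList [Char.ofNat (64 + i).toNat]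
  else  -- j = i - 27 inlined
    String.ofList [Char.ofNat (65 + PySem.Int.floordiv (i - 27) 26).toNat] ++
      String.ofList [Char.ofNat (65 + PySem.Int.mod (i - 27) 26).toNat]

def plate_axes_alt (tot_cols : Int) (tot_rows : Int) : List Int × List String :=
  (PySem.List.pyRange 1 (tot_cols + 1) 1,
   (PySem.List.pyRange 1 (tot_rows + 1) 1).map rowLabelB)

-- ===== PRECONDITION & SPEC =====
-- No Pre_: for tot_rows ≥ 28965249 BOTH Pythons raise the same ValueError (chr past 0x10FFFF);
-- everywhere both return, the ports are exact and agree.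
def Spec_plate_axes (tot_cols : Int) (tot_rows : Int) (out : List Int × List String) : Prop := out = plate_axes_alt tot_cols tot_rows
instance (tot_cols : Int) (tot_rows : Int) (out : List Int × List String) : Decidable (Spec_plate_axes tot_cols tot_rows out) := by unfold Spec_plate_axes; infer_instance

-- ===== CLAIM (what is proved, stated in full; the proofs are below) =====
def Claim_equal_plate_axes : Prop := ∀ (tot_cols : Int) (tot_rows : Int), Dom_plate_axes tot_cols tot_rows → Spec_plate_axes tot_cols tot_rows (plate_axes tot_cols tot_rows)

-- ===== LEMMAS AND PROOFS =====

-- A's loop state at entry of iteration i (before the branch), as a closed form of i.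
def entryA (i : Nat) : Nat := if i ≤ 27 then 64 + i else 66 + (i - 28) % 26
def entryB (i : Nat) : Nat := if i ≤ 27 then 0 else 65 + (i - 28) / 26

def rangeInts (s n : Nat) : List Int := (List.range n).map (fun k => ((s + k : Nat) : Int))

lemma rangeInts_succ (s n : Nat) : rangeInts s (n + 1) = ((s : Nat) : Int) :: rangeInts (s + 1) n := by
  simp only [rangeInts, List.range_succ_eq_map, List.map_cons, List.map_map]
  refine congrArg₂ List.cons (by norm_num) ?_
  refine List.map_congr_left (fun k _ => ?_)
  simp only [Function.comp_apply]
  push_cast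
  ring

lemma label1_eq (a a' : Nat) (ha : a = a') :
    "" ++ String.ofList [Char.ofNat a] = String.ofList [Char.ofNat a'] := by
  subst ha; simp

lemma label2_eq (b a b' a' : Nat) (hb : b = b') (ha : a = a') :
    String.ofList [Char.ofNat b] ++ String.ofList [Char.ofNat a]
      = String.ofList [Char.ofNat b'] ++ String.ofList [Char.ofNat a'] := by
  rw [hb, ha]

set_option maxHeartbeats 2000000 in
lemma stepA_eq (acc : List String) (s : Nat) (hs : 1 ≤ s) :
    plateStepA (acc, entryA s, entryB s) ((s : Nat) : Int)
      = (acc ++ [rowLabelB ((s : Nat) : Int)], entryA (s + 1), entryB (s + 1)) := by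
  simp only [plateStepA, rowLabelB, entryA, entryB,
    PySem.Int.mod_eq_emod_of_pos (a := ((s : Nat) : Int)) (by norm_num : (0:Int) < 26),
    PySem.Int.mod_eq_emod_of_pos (a := ((s : Nat) : Int) - 27) (by norm_num : (0:Int) < 26),
    PySem.Int.floordiv_eq_ediv_of_pos (a := ((s : Nat) : Int) - 27) (by norm_num : (0:Int) < 26)]
  split_ifs with h1 h2 h3 h4 h5 h6 h7 h8 h9 h10 h11 h12 h13 <;>
    refine Prod.ext ?_ (Prod.ext ?_ ?_) <;>
    simp only [List.append_cancel_left_eq, List.cons.injEq, and_true] <;>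
    first
      | omega
      | exact label1_eq _ _ (by omega)
      | exact label2_eq _ _ _ _ (by omega) (by omega)
      | (exfalso; omega)

lemma loopA_eq : ∀ (n s : Nat) (acc : List String), 1 ≤ s →
    (rangeInts s n).foldl plateStepA (acc, entryA s, entryB s)
      = (acc ++ (rangeInts s n).map rowLabelB, entryA (s + n), entryB (s + n)) := by
  intro n
  induction n with
  | zero => intro s acc _; simp [rangeInts]
  | succ n ih =>
    intro s acc hs
    rw [rangeInts_succ]
    simp only [List.foldl_cons, List.map_cons]
    rw [stepA_eq acc s hs, ih (s + 1) (acc ++ [rowLabelB ((s : Nat) : Int)]) (by omega)]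
    have h1 : s + 1 + n = s + (n + 1) := by omega
    rw [h1]
    simp [List.append_assoc]

lemma foldl_app_id : ∀ (l acc : List Int), l.foldl (fun a x => a ++ [x]) acc = acc ++ l := by
  intro l
  induction l with
  | nil => simp
  | cons x xs ih => intro acc; simp [List.foldl_cons, ih]

lemma pyRange_eq_rangeInts (t : Int) :
    PySem.List.pyRange 1 (t + 1) 1 = rangeInts 1 t.toNat := by
  rw [PySem.List.pyRange_one]
  have h : (t + 1 - 1).toNat = t.toNat := by omega
  rw [h, rangeInts]
  exact List.map_congr_left (fun k _ => by push_cast; ring)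

-- ===== VERDICT (by name: the statement is the Claim_ definition above) =====
theorem plate_axes_spec : Claim_equal_plate_axes := by
  intro tc tr _
  unfold Spec_plate_axes plate_axes plate_axes_alt
  refine Prod.ext ?_ ?_
  · simp only [foldl_app_id, List.nil_append]
  · simp only [pyRange_eq_rangeInts tr]
    have h := loopA_eq tr.toNat 1 [] (by omega)
    simp only [entryA, entryB] at h
    norm_num at h
    rw [h]
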